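-- pv_equiv track=rewrite | github.com/jklypchak13/advent_of_code | 2023/day10/day10.py | convert_to_high_res
-- ===== SOURCE A (Python) =====
-- STEPS = {
--     '|': [(-1, 0), (1, 0)],
--     '-': [(0, -1), (0, 1)],
--     'L': [(-1, 0), (0, 1)],
--     'J': [(-1, 0), (0, -1)],
--     '7': [(1, 0), (0, -1)],
--     'F': [(1, 0), (0, 1)],
-- }
--
-- def convert_to_high_res(lines, loop):
--     """converts the line array to a higher resolution map, where each character is replaced by a 3x3 grid of characters, encoding the same data
--     """
--     result = []
--     # Set everything to a 0
--     for i in range(len(lines) * 3):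
--         row = []
--         for j in range(len(lines[0]) * 3):
--             row.append('0')
--         result.append(row)
--
--     # Set all items in the loop to a wall character (X)
--     for row, column in loop:
--         result[row * 3 + 1][column * 3 + 1] = 'X'
--
--         # Special Handling for starting character
--         if lines[row][column] == 'S':
--             offsets = [(loop[1][0] - row, loop[1][1] - column), (loop[-1][0] - row, loop[-1][1] - column)]
--         else:
--             offsets = STEPS[lines[row][column]]
--         for offset in offsets:
--             result[row * 3 + 1 + offset[0]][column * 3 + 1 + offset[1]] = 'X'
--     return result
-- ===== SOURCE B (Python) =====
-- STEPS = {
--     '|': [(-1, 0), (1, 0)],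
--     '-': [(0, -1), (0, 1)],
--     'L': [(-1, 0), (0, 1)],
--     'J': [(-1, 0), (0, -1)],
--     '7': [(1, 0), (0, -1)],
--     'F': [(1, 0), (0, 1)],
-- }
--
--
-- def _arms(lines, loop, row, column):
--     """wall-arm offsets of loop cell (row, column), relative to the cell itself"""
--     char = lines[row][column]
--     if char != 'S':
--         return STEPS[char]
--     return [(r - row, c - column) for r, c in (loop[1], loop[-1])]
--
--
-- def convert_to_high_res(lines, loop):
--     """converts the line array to a higher resolution map, where each character is
--     replaced by a 3x3 grid of characters, encoding the same data
--     """
--     # Map each loop cell to its arm offsets first.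
--     marks = {(row, column): _arms(lines, loop, row, column) for row, column in loop}
--     # Assemble the output block by block: each original cell becomes a 3x3 tile,
--     # built directly ('0' everywhere, center 'X' plus the arms for loop cells),
--     # and the three tile rows are appended to the three output rows being grown.
--     result = []
--     for i in range(len(lines)):
--         rows = [[], [], []]
--         for j in range(len(lines[0])):
--             tile = [['0', '0', '0'], ['0', '0', '0'], ['0', '0', '0']]
--             if (i, j) in marks:
--                 tile[1][1] = 'X'
--                 for dr, dc in marks[(i, j)]:
--                     tile[1 + dr][1 + dc] = 'X'
--             for r in range(3):
--                 rows[r].extend(tile[r])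
--         result.extend(rows)
--     return result
-- ===== Notes on version B (the rewrite author's own statement) =====
-- stated objective: alternative
-- what changed: B maps each loop cell to its arm offsets once, then assembles the output block-by-block in a single pass over the original grid, building each cell's 3x3 tile directly and extending three growing rows per input row, instead of allocating a full zero grid and mutating individual cells afterwards.
import Mathlib
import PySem

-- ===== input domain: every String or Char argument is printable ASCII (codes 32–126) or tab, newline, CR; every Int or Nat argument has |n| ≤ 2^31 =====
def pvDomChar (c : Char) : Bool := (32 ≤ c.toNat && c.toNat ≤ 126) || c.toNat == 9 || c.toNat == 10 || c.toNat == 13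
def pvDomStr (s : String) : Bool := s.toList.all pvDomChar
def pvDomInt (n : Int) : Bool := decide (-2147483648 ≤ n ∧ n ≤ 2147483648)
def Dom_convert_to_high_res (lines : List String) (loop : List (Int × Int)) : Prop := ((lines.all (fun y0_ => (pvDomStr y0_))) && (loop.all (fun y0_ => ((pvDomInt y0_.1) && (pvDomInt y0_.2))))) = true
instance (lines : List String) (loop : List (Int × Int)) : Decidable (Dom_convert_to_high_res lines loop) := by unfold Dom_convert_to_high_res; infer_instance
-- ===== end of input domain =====

-- B maps each loop cell to its arm offsets once and then assembles the output block by
-- block in one pass over the original grid (each cell's 3x3 tile is built directly),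
-- instead of allocating a full zero grid and mutating individual cells afterwards
-- (objective: alternative decomposition, same cost).

-- module-level constant STEPS (None = KeyError on lookup)
def STEPS (c : Char) : Option (List (Int × Int)) :=
  if c = '|' then some [(-1, 0), (1, 0)]
  else if c = '-' then some [(0, -1), (0, 1)]
  else if c = 'L' then some [(-1, 0), (0, 1)]
  else if c = 'J' then some [(-1, 0), (0, -1)]
  else if c = '7' then some [(1, 0), (0, -1)]
  else if c = 'F' then some [(1, 0), (0, 1)]
  else none

-- lines[row][column] (Python chained indexing, negative indices from the end; none = IndexError)
def pvCharAt (lines : List String) (r c : Int) : Option Char :=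
  (PySem.List.pyGet? lines r).bind (fun s => PySem.Str.pyGet? s c)

-- g[i][j] = v  (Python list-of-lists item assignment, shared by both ports: a negative index
-- counts from the end; where Python would raise IndexError the grid is returned unchanged —
-- Pre_ excludes those inputs)
def pvSet2 (g : List (List String)) (i j : Int) (v : String) : List (List String) :=
  let i' : Int := if i < 0 then (g.length : Int) + i else i
  if 0 ≤ i' ∧ i' < (g.length : Int) then
    let row := g.getD i'.toNat []
    let j' : Int := if j < 0 then (row.length : Int) + j else j
    if 0 ≤ j' ∧ j' < (row.length : Int) then
      g.set i'.toNat (row.set j'.toNat v)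
    else g
  else g

-- ===== PORT A =====
def convert_to_high_res (lines : List String) (loop : List (Int × Int)) : List (List String) :=
  -- Set everything to a 0  (len(lines[0]) is only reached when lines ≠ [], hence headD)
  let result : List (List String) :=
    (List.range (lines.length * 3)).foldl
      (fun result _ =>
        result ++ [(List.range ((lines.headD "").length * 3)).foldl (fun row _ => row ++ ["0"]) []])
      []
  -- Set all items in the loop to a wall character (X)
  loop.foldl
    (fun result rc =>
      let row := rc.1
      let column := rc.2
      let result := pvSet2 result (row * 3 + 1) (column * 3 + 1) "X"
      let offsets : List (Int × Int) :=
        if pvCharAt lines row column = some 'S' then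
          [(((PySem.List.pyGet? loop 1).getD (0, 0)).1 - row,
            ((PySem.List.pyGet? loop 1).getD (0, 0)).2 - column),
           (((PySem.List.pyGet? loop (-1)).getD (0, 0)).1 - row,
            ((PySem.List.pyGet? loop (-1)).getD (0, 0)).2 - column)]
        else (STEPS ((pvCharAt lines row column).getD ' ')).getD []
      offsets.foldl
        (fun result o => pvSet2 result (row * 3 + 1 + o.1) (column * 3 + 1 + o.2) "X")
        result)
    result

-- ===== PORT B =====
-- wall-arm offsets of loop cell (row, column), relative to the cell itself
-- (loop[1] / loop[-1] via pyGet?; Pre_ excludes the inputs where Python raises)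
def pvArms (lines : List String) (loop : List (Int × Int)) (row column : Int) :
    List (Int × Int) :=
  let char := pvCharAt lines row column
  if char ≠ some 'S' then (STEPS (char.getD ' ')).getD []
  else
    [(PySem.List.pyGet? loop 1).getD (0, 0), (PySem.List.pyGet? loop (-1)).getD (0, 0)].map
      (fun p => (p.1 - row, p.2 - column))

def convert_to_high_res_alt (lines : List String) (loop : List (Int × Int)) : List (List String) :=
  -- Map each loop cell to its arm offsets first (a dict comprehension: repeated
  -- keys overwrite, exactly a foldl of inserts).
  let marks : PySem.Dict (Int × Int) (List (Int × Int)) :=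
    loop.foldl (fun marks rc => marks.insert (rc.1, rc.2) (pvArms lines loop rc.1 rc.2))
      PySem.Dict.empty
  -- Assemble the output block by block, three growing rows per input row.
  (List.range lines.length).foldl
    (fun result (i : Nat) =>
      let rows :=
        (List.range (lines.headD "").length).foldl
          (fun rows (j : Nat) =>
            let tile0 : List (List String) := [["0","0","0"],["0","0","0"],["0","0","0"]]
            -- '(i, j) in marks' then 'marks[(i, j)]': membership and lookup as one get?
            let tile : List (List String) :=
              match marks.get? ((i : Int), (j : Int)) with
              | some offs =>
                  offs.foldl (fun tile o => pvSet2 tile (1 + o.1) (1 + o.2) "X")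
                    (pvSet2 tile0 1 1 "X")
              | none => tile0
            -- 'rows' always has exactly 3 rows: 'for r in range(3): rows[r].extend(tile[r])' unrolled
            [rows.getD 0 [] ++ tile.getD 0 [], rows.getD 1 [] ++ tile.getD 1 [],
             rows.getD 2 [] ++ tile.getD 2 []])
          [[], [], []]
      result ++ rows)
    []

-- ===== PRECONDITION & SPEC =====
-- Pre_ excludes the inputs where Python A raises (a loop coordinate or a wall-write index out
-- of range, a character outside STEPS∪{'S'}, 'S' with len(loop) < 2) and the inputs where an
-- 'S' arm endpoint (loop[1] or loop[-1]) is not grid-adjacent to the S cell: there A scatters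
-- the arm outside the S cell's own 3x3 tile (wrapping on negative indices) while B's per-cell
-- tile assembly raises an IndexError, so B returns no value to compare.
def Pre_convert_to_high_res (lines : List String) (loop : List (Int × Int)) : Prop :=
  ∀ rc ∈ loop,
    0 ≤ rc.1 ∧ rc.1 < (lines.length : Int) ∧
    0 ≤ rc.2 ∧ rc.2 < ((lines.headD "").length : Int) ∧
    (pvCharAt lines rc.1 rc.2).isSome = true ∧
    ((STEPS ((pvCharAt lines rc.1 rc.2).getD ' ')).isSome = true ∨
      ((pvCharAt lines rc.1 rc.2).getD ' ' = 'S' ∧ 2 ≤ loop.length ∧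
        ∀ p ∈ [(PySem.List.pyGet? loop 1).getD (0, 0), (PySem.List.pyGet? loop (-1)).getD (0, 0)],
          rc.1 - 1 ≤ p.1 ∧ p.1 ≤ rc.1 + 1 ∧ rc.2 - 1 ≤ p.2 ∧ p.2 ≤ rc.2 + 1))
instance (lines : List String) (loop : List (Int × Int)) : Decidable (Pre_convert_to_high_res lines loop) := by
  unfold Pre_convert_to_high_res; infer_instance

def pvWitness_convert_to_high_res : List String × (List (Int × Int)) := (["S7"], [(0, 0), (0, 1)])

def Spec_convert_to_high_res (lines : List String) (loop : List (Int × Int)) (out : List (List String)) : Prop := out = convert_to_high_res_alt lines loop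
instance (lines : List String) (loop : List (Int × Int)) (out : List (List String)) : Decidable (Spec_convert_to_high_res lines loop out) := by unfold Spec_convert_to_high_res; infer_instance

-- ===== CLAIM (what is proved, stated in full; the proofs are below) =====
def Claim_equal_convert_to_high_res : Prop := ∀ (lines : List String) (loop : List (Int × Int)), Dom_convert_to_high_res lines loop → Pre_convert_to_high_res lines loop → Spec_convert_to_high_res lines loop (convert_to_high_res lines loop)

-- ===== LEMMAS AND PROOFS =====

-- the arm offsets both programs compute for a loop cell
def pvOffs (lines : List String) (loop : List (Int × Int)) (rc : Int × Int) : List (Int × Int) :=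
  if pvCharAt lines rc.1 rc.2 = some 'S' then
    [(((PySem.List.pyGet? loop 1).getD (0, 0)).1 - rc.1,
      ((PySem.List.pyGet? loop 1).getD (0, 0)).2 - rc.2),
     (((PySem.List.pyGet? loop (-1)).getD (0, 0)).1 - rc.1,
      ((PySem.List.pyGet? loop (-1)).getD (0, 0)).2 - rc.2)]
  else (STEPS ((pvCharAt lines rc.1 rc.2).getD ' ')).getD []

-- all high-resolution coordinates marked for one loop cell, and for the whole loop
def pvTargets (lines : List String) (loop : List (Int × Int)) (rc : Int × Int) : List (Int × Int) :=
  (rc.1 * 3 + 1, rc.2 * 3 + 1) ::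
    (pvOffs lines loop rc).map (fun o => (rc.1 * 3 + 1 + o.1, rc.2 * 3 + 1 + o.2))

def pvW (lines : List String) (loop : List (Int × Int)) : List (Int × Int) :=
  loop.flatMap (pvTargets lines loop)

def pvWr (g : List (List String)) (p : Int × Int) : List (List String) :=
  pvSet2 g p.1 p.2 "X"

-- the canonical pointwise grid both ports are reduced to
def pvF (lines : List String) (loop : List (Int × Int)) (x y : Nat) : String :=
  if ((x : Int), (y : Int)) ∈ pvW lines loop then "X" else "0"

def pvCanon (lines : List String) (loop : List (Int × Int)) : List (List String) :=
  (List.range (lines.length * 3)).map (fun x =>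
    (List.range ((lines.headD "").length * 3)).map (fun y => pvF lines loop x y))

theorem pv_foldl_flatMap {γ δ β : Type} (L : List γ) (f : γ → List δ) (step : β → δ → β) (init : β) :
    L.foldl (fun acc x => (f x).foldl step acc) init = (L.flatMap f).foldl step init := by
  induction L generalizing init with
  | nil => simp
  | cons p t ih => simp [List.flatMap_cons, List.foldl_append, ih]

theorem pv_set_row_getD_length (g : List (List String)) (N : Nat) (hN : N < g.length)
    (v : String) (M : Nat) (x : Nat) :
    ((g.set N ((g.getD N []).set M v)).getD x []).length = (g.getD x []).length := by
  by_cases hx : x = N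
  · subst hx; simp [List.getD_eq_getElem?_getD, List.getElem?_set_self hN]
  · simp [List.getD_eq_getElem?_getD, List.getElem?_set_ne (fun h => hx h.symm)]

theorem pvSet2_length (g : List (List String)) (i j : Int) (v : String) :
    (pvSet2 g i j v).length = g.length := by
  unfold pvSet2; dsimp only; split_ifs <;> simp

theorem pvSet2_row_length (g : List (List String)) (i j : Int) (v : String) (x : Nat) :
    ((pvSet2 g i j v).getD x []).length = (g.getD x []).length := by
  unfold pvSet2; dsimp only; split_ifs <;> first | rfl | (apply pv_set_row_getD_length; omega)

theorem pvSet2_getD (g : List (List String)) (v : String) (x y : Nat) (i j : Int)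
    (hi : 0 ≤ i) (hj : 0 ≤ j) (hx : x < g.length) (hy : y < (g.getD x []).length) :
    ((pvSet2 g i j v).getD x []).getD y "" =
      if i = (x : Int) ∧ j = (y : Int) then v else (g.getD x []).getD y "" := by
  have hni : ¬ i < 0 := by omega
  have hy' : y < (g[x]?.getD []).length := by
    rw [← List.getD_eq_getElem?_getD]; exact hy
  unfold pvSet2
  dsimp only
  rw [if_neg hni]
  by_cases hix : i = (x : Int)
  · have hcond : 0 ≤ i ∧ i < (g.length : Int) := ⟨hi, by rw [hix]; exact_mod_cast hx⟩
    rw [if_pos hcond]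
    have hit : i.toNat = x := by omega
    rw [hit]
    have hnj : ¬ j < 0 := by omega
    rw [if_neg hnj]
    by_cases hjy : j = (y : Int)
    · have hcond2 : 0 ≤ j ∧ j < ((g.getD x []).length : Int) := ⟨hj, by rw [hjy]; exact_mod_cast hy⟩
      rw [if_pos hcond2, if_pos ⟨hix, hjy⟩]
      have hjt : j.toNat = y := by omega
      rw [hjt]
      simp [List.getD_eq_getElem?_getD, List.getElem?_set_self hx, List.getElem?_set_self hy']
    · rw [if_neg (show ¬ (i = (x : Int) ∧ j = (y : Int)) from by tauto)]
      split_ifs with hc2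
      · simp [List.getD_eq_getElem?_getD, List.getElem?_set_self hx,
          List.getElem?_set_ne (by omega : j.toNat ≠ y)]
      · rfl
  · rw [if_neg (show ¬ (i = (x : Int) ∧ j = (y : Int)) from by tauto)]
    have hit : i.toNat ≠ x := by omega
    split_ifs <;> simp [List.getD_eq_getElem?_getD, List.getElem?_set_ne hit]

theorem pv_foldl_pvWr_length (L : List (Int × Int)) (g : List (List String)) :
    (L.foldl pvWr g).length = g.length := by
  induction L generalizing g with
  | nil => rfl
  | cons p t ih => simp [List.foldl_cons, ih, pvWr, pvSet2_length]

theorem pv_foldl_pvWr_row_length (L : List (Int × Int)) (g : List (List String)) (x : Nat) :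
    ((L.foldl pvWr g).getD x []).length = (g.getD x []).length := by
  induction L generalizing g with
  | nil => rfl
  | cons p t ih => rw [List.foldl_cons, ih, pvWr, pvSet2_row_length]

theorem pv_foldl_pvWr_getD (L : List (Int × Int)) (g : List (List String)) (x y : Nat)
    (hL : ∀ p ∈ L, 0 ≤ p.1 ∧ 0 ≤ p.2)
    (hx : x < g.length) (hy : y < (g.getD x []).length) :
    ((L.foldl pvWr g).getD x []).getD y "" =
      if ((x : Int), (y : Int)) ∈ L then "X" else (g.getD x []).getD y "" := by
  induction L generalizing g with
  | nil => simp
  | cons p t ih =>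
    have hp := hL p List.mem_cons_self
    have hx' : x < (pvWr g p).length := by rw [pvWr, pvSet2_length]; exact hx
    have hy' : y < ((pvWr g p).getD x []).length := by rw [pvWr, pvSet2_row_length]; exact hy
    rw [List.foldl_cons, ih (pvWr g p) (fun q hq => hL q (List.mem_cons_of_mem _ hq)) hx' hy']
    rw [pvWr, pvSet2_getD g "X" x y p.1 p.2 hp.1 hp.2 hx hy]
    by_cases hm : ((x : Int), (y : Int)) ∈ t
    · simp [hm]
    · by_cases hpq : p = ((x : Int), (y : Int))
      · simp [hm, hpq]
      · have : ¬ (p.1 = (x : Int) ∧ p.2 = (y : Int)) := by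
          intro h; exact hpq (Prod.ext h.1 h.2)
        simp [hm, this, List.mem_cons]
        intro h; exact absurd h.symm hpq

theorem pv_steps_bound (ch : Char) (o : Int × Int) (ho : o ∈ (STEPS ch).getD []) :
    -1 ≤ o.1 ∧ o.1 ≤ 1 ∧ -1 ≤ o.2 ∧ o.2 ≤ 1 := by
  unfold STEPS at ho
  split_ifs at ho <;> simp at ho <;> rcases ho with rfl | rfl <;> norm_num

-- under Pre_, every arm offset of a loop cell lies in [-1,1]²
theorem pvOffs_bound (lines : List String) (loop : List (Int × Int))
    (hpre : Pre_convert_to_high_res lines loop) (rc : Int × Int) (hrc : rc ∈ loop)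
    (o : Int × Int) (ho : o ∈ pvOffs lines loop rc) :
    -1 ≤ o.1 ∧ o.1 ≤ 1 ∧ -1 ≤ o.2 ∧ o.2 ≤ 1 := by
  obtain ⟨hr0, hrh, hc0, hcw, hsome, hcase⟩ := hpre rc hrc
  rw [pvOffs] at ho
  split_ifs at ho with hS
  · have hch : (pvCharAt lines rc.1 rc.2).getD ' ' = 'S' := by rw [hS]; rfl
    rcases hcase with hL | ⟨_, hlen, hadj⟩
    · rw [hch] at hL; simp [STEPS] at hL
    · simp only [List.mem_cons, List.not_mem_nil, or_false] at ho
      rcases ho with rfl | rfl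
      · have hb := hadj ((PySem.List.pyGet? loop 1).getD (0, 0)) (by simp)
        exact ⟨by dsimp; omega, by dsimp; omega, by dsimp; omega, by dsimp; omega⟩
      · have hb := hadj ((PySem.List.pyGet? loop (-1)).getD (0, 0)) (by simp)
        exact ⟨by dsimp; omega, by dsimp; omega, by dsimp; omega, by dsimp; omega⟩

  · exact pv_steps_bound _ _ ho

-- under Pre_, every marked coordinate of a loop cell stays in that cell's own 3x3 block
theorem pvTargets_block (lines : List String) (loop : List (Int × Int))
    (hpre : Pre_convert_to_high_res lines loop) (rc : Int × Int) (hrc : rc ∈ loop)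
    (p : Int × Int) (hp : p ∈ pvTargets lines loop rc) :
    3 * rc.1 ≤ p.1 ∧ p.1 ≤ 3 * rc.1 + 2 ∧ 3 * rc.2 ≤ p.2 ∧ p.2 ≤ 3 * rc.2 + 2 := by
  rw [pvTargets, List.mem_cons] at hp
  rcases hp with rfl | hp
  · exact ⟨by dsimp; omega, by dsimp; omega, by dsimp; omega, by dsimp; omega⟩
  · rw [List.mem_map] at hp
    obtain ⟨o, ho, rfl⟩ := hp
    have hb := pvOffs_bound lines loop hpre rc hrc o ho
    exact ⟨by dsimp; omega, by dsimp; omega, by dsimp; omega, by dsimp; omega⟩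

theorem pvW_nonneg (lines : List String) (loop : List (Int × Int))
    (hpre : Pre_convert_to_high_res lines loop) :
    ∀ p ∈ pvW lines loop, 0 ≤ p.1 ∧ 0 ≤ p.2 := by
  intro p hp
  rw [pvW, List.mem_flatMap] at hp
  obtain ⟨rc, hrc, hpt⟩ := hp
  obtain ⟨hr0, _, hc0, _, _, _⟩ := hpre rc hrc
  have hb := pvTargets_block lines loop hpre rc hrc p hpt
  exact ⟨by omega, by omega⟩

-- membership of a block-(i,j) position in pvW reduces to the cell (i,j) itself
theorem pvW_block_iff (lines : List String) (loop : List (Int × Int))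
    (hpre : Pre_convert_to_high_res lines loop) (i j r c : Nat) (hr : r < 3) (hc : c < 3) :
    (((3 * i + r : Nat) : Int), ((3 * j + c : Nat) : Int)) ∈ pvW lines loop ↔
      (((i : Int), (j : Int)) ∈ loop ∧
        (((3 * i + r : Nat) : Int), ((3 * j + c : Nat) : Int)) ∈
          pvTargets lines loop ((i : Int), (j : Int))) := by
  constructor
  · intro hp
    rw [pvW, List.mem_flatMap] at hp
    obtain ⟨rc, hrc, hpt⟩ := hp
    have hb := pvTargets_block lines loop hpre rc hrc _ hpt
    have h1 : rc.1 = (i : Int) := by dsimp at hb; omega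
    have h2 : rc.2 = (j : Int) := by dsimp at hb; omega
    have hrc' : rc = ((i : Int), (j : Int)) := Prod.ext h1 h2
    rw [hrc'] at hrc hpt
    exact ⟨hrc, hpt⟩
  · intro ⟨hmem, hpt⟩
    rw [pvW, List.mem_flatMap]
    exact ⟨_, hmem, hpt⟩

-- ===== A reduced to the canonical grid =====
theorem pvA_eq (lines : List String) (loop : List (Int × Int)) :
    convert_to_high_res lines loop =
      (pvW lines loop).foldl pvWr
        (List.replicate (lines.length * 3)
          (List.replicate ((lines.headD "").length * 3) "0")) := by
  unfold convert_to_high_res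
  simp only [PySem.List.foldl_append_singleton_eq_map, List.map_const', List.length_range,
    List.nil_append]
  rw [pvW, ← pv_foldl_flatMap]
  congr 1
  funext g rc
  simp [pvTargets, pvOffs, pvWr, List.foldl_map]

theorem pvA_canon (lines : List String) (loop : List (Int × Int))
    (hpre : Pre_convert_to_high_res lines loop) :
    convert_to_high_res lines loop = pvCanon lines loop := by
  rw [pvA_eq, pvCanon]
  have hnn := pvW_nonneg lines loop hpre
  apply List.ext_getElem
  · simp [pv_foldl_pvWr_length]
  · intro x hx1 hx2
    have hxR : x < lines.length * 3 := by simpa using hx2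
    have hinit_len :
        x < (List.replicate (lines.length * 3)
          (List.replicate ((lines.headD "").length * 3) "0")).length := by simpa using hxR
    have hinit_row :
        (List.replicate (lines.length * 3)
            (List.replicate ((lines.headD "").length * 3) "0")).getD x []
          = List.replicate ((lines.headD "").length * 3) "0" := by
      simp [List.getD_eq_getElem?_getD, hxR]
    rw [List.getElem_map, List.getElem_range]
    apply List.ext_getElem
    · rw [← List.getD_eq_getElem _ [] hx1, pv_foldl_pvWr_row_length, hinit_row]
      simp
    · intro y hy1 hy2
      have hyC : y < (lines.headD "").length * 3 := by
        rw [← List.getD_eq_getElem _ [] hx1, pv_foldl_pvWr_row_length, hinit_row] at hy1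
        simpa using hy1
      have hrow_len :
          y < ((List.replicate (lines.length * 3)
            (List.replicate ((lines.headD "").length * 3) "0")).getD x []).length := by
        rw [hinit_row]; simpa using hyC
      rw [List.getElem_map, List.getElem_range]
      rw [← List.getD_eq_getElem _ "" hy1, ← List.getD_eq_getElem _ [] hx1]
      rw [pv_foldl_pvWr_getD _ _ x y hnn hinit_len hrow_len, hinit_row, pvF]
      split_ifs
      · rfl
      · have hyC' : y < (lines.head?.getD "").length * 3 := by
          simpa [List.headD_eq_head?_getD] using hyC
        simp [List.getD_eq_getElem?_getD, hyC']

-- ===== B reduced to the canonical grid =====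

theorem pv_get?_foldl_insert (L : List (Int × Int)) (f : (Int × Int) → List (Int × Int))
    (d : PySem.Dict (Int × Int) (List (Int × Int))) (k : Int × Int) :
    (L.foldl (fun m rc => m.insert rc (f rc)) d).get? k =
      if k ∈ L then some (f k) else d.get? k := by
  induction L generalizing d with
  | nil => simp
  | cons a t ih =>
    rw [List.foldl_cons, ih, PySem.Dict.get?_insert]
    by_cases hkt : k ∈ t
    · simp [hkt, List.mem_cons]
    · by_cases hka : k = a
      · subst hka; simp [hkt, List.mem_cons]
      · simp [hkt, hka, List.mem_cons]

-- a list of length 3 written out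
theorem pv_list_len3 (l : List String) (h : l.length = 3) :
    l = [l.getD 0 "", l.getD 1 "", l.getD 2 ""] := by
  rcases l with _ | ⟨a, _ | ⟨b, _ | ⟨c, _ | ⟨d, t⟩⟩⟩⟩ <;> simp_all

theorem pv_flat3 {α : Type} (h : Nat) (g : Nat → α) :
    (List.range h).flatMap (fun i => [g (3 * i), g (3 * i + 1), g (3 * i + 2)]) =
      (List.range (h * 3)).map g := by
  induction h with
  | zero => simp
  | succ n ih =>
    rw [List.range_succ, List.flatMap_append, ih]
    have h3 : (n + 1) * 3 = n * 3 + 1 + 1 + 1 := by ring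
    rw [h3, List.range_succ, List.range_succ, List.range_succ]
    simp [Nat.mul_comm, List.append_assoc]

-- the three-growing-rows loop is three flatMaps
theorem pv_rows3 (n : Nat) (t0 t1 t2 : Nat → List String) (a b c : List String) :
    (List.range n).foldl
        (fun rows j => [rows.getD 0 [] ++ t0 j, rows.getD 1 [] ++ t1 j, rows.getD 2 [] ++ t2 j])
        [a, b, c]
      = [a ++ (List.range n).flatMap t0, b ++ (List.range n).flatMap t1,
         c ++ (List.range n).flatMap t2] := by
  induction n with
  | zero => simp
  | succ n ih =>
    rw [List.range_succ, List.foldl_append, ih, List.flatMap_append, List.flatMap_append]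
    simp [List.getD, List.append_assoc]

-- B's marks dictionary, with the offsets named
def pvMarks (lines : List String) (loop : List (Int × Int)) :
    PySem.Dict (Int × Int) (List (Int × Int)) :=
  loop.foldl (fun m rc => m.insert rc (pvOffs lines loop rc)) PySem.Dict.empty

-- B's 3x3 tile for original cell (i, j)
def pvTileB (lines : List String) (loop : List (Int × Int)) (i j : Nat) : List (List String) :=
  match (pvMarks lines loop).get? ((i : Int), (j : Int)) with
  | some offs =>
      offs.foldl (fun tile o => pvSet2 tile (1 + o.1) (1 + o.2) "X")
        (pvSet2 [["0","0","0"],["0","0","0"],["0","0","0"]] 1 1 "X")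
  | none => [["0","0","0"],["0","0","0"],["0","0","0"]]

theorem pvArms_eq (lines : List String) (loop : List (Int × Int)) (rc : Int × Int) :
    pvArms lines loop rc.1 rc.2 = pvOffs lines loop rc := by
  rw [pvArms, pvOffs]
  by_cases h : pvCharAt lines rc.1 rc.2 = some 'S' <;> simp [h]

theorem pvMarks_get? (lines : List String) (loop : List (Int × Int)) (k : Int × Int) :
    (pvMarks lines loop).get? k =
      if k ∈ loop then some (pvOffs lines loop k) else none := by
  rw [pvMarks, pv_get?_foldl_insert]
  simp

theorem pvB_structured (lines : List String) (loop : List (Int × Int)) :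
    convert_to_high_res_alt lines loop =
      (List.range lines.length).foldl
        (fun result i =>
          result ++
            (List.range (lines.headD "").length).foldl
              (fun rows j =>
                [rows.getD 0 [] ++ (pvTileB lines loop i j).getD 0 [],
                 rows.getD 1 [] ++ (pvTileB lines loop i j).getD 1 [],
                 rows.getD 2 [] ++ (pvTileB lines loop i j).getD 2 []])
              [[], [], []])
        [] := by
  unfold convert_to_high_res_alt
  have hM :
      loop.foldl (fun (marks : PySem.Dict (Int × Int) (List (Int × Int))) rc =>
          marks.insert (rc.1, rc.2) (pvArms lines loop rc.1 rc.2)) PySem.Dict.empty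
        = pvMarks lines loop := by
    rw [pvMarks]
    congr 1
    funext m rc
    rw [pvArms_eq]
  dsimp only
  rw [hM]
  rfl

theorem pvTileB_row_length (lines : List String) (loop : List (Int × Int)) (i j r : Nat)
    (hr : r < 3) :
    ((pvTileB lines loop i j).getD r []).length = 3 := by
  rw [pvTileB]
  cases hg : (pvMarks lines loop).get? ((i : Int), (j : Int)) with
  | none => interval_cases r <;> rfl
  | some offs =>
    dsimp only
    rw [show (fun (tile : List (List String)) (o : Int × Int) =>
          pvSet2 tile (1 + o.1) (1 + o.2) "X") = (fun tile o => pvWr tile (1 + o.1, 1 + o.2))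
        from rfl]
    rw [show (offs.foldl (fun tile o => pvWr tile (1 + o.1, 1 + o.2))
          (pvSet2 [["0","0","0"],["0","0","0"],["0","0","0"]] 1 1 "X"))
        = ((offs.map (fun o => ((1 + o.1 : Int), (1 + o.2 : Int)))).foldl pvWr
            (pvWr [["0","0","0"],["0","0","0"],["0","0","0"]] (1, 1)))
        from by rw [List.foldl_map]; rfl]
    rw [pv_foldl_pvWr_row_length, pvWr, pvSet2_row_length]
    interval_cases r <;> rfl

theorem pvTileB_entry (lines : List String) (loop : List (Int × Int))
    (hpre : Pre_convert_to_high_res lines loop) (i j r c : Nat) (hr : r < 3) (hc : c < 3) :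
    ((pvTileB lines loop i j).getD r []).getD c "" = pvF lines loop (3 * i + r) (3 * j + c) := by
  rw [pvTileB, pvF]
  rw [pvMarks_get?]
  by_cases hmem : ((i : Int), (j : Int)) ∈ loop
  · rw [if_pos hmem]
    dsimp only
    have htile :
        (pvOffs lines loop ((i : Int), (j : Int))).foldl
            (fun tile o => pvSet2 tile (1 + o.1) (1 + o.2) "X")
            (pvSet2 [["0","0","0"],["0","0","0"],["0","0","0"]] 1 1 "X")
          = ((((1 : Int), (1 : Int)) ::
              (pvOffs lines loop ((i : Int), (j : Int))).map
                (fun o => ((1 + o.1 : Int), (1 + o.2 : Int)))).foldl pvWr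
              [["0","0","0"],["0","0","0"],["0","0","0"]]) := by
      rw [List.foldl_cons, List.foldl_map]
      rfl
    rw [htile]
    have hnn : ∀ p ∈ (((1 : Int), (1 : Int)) ::
        (pvOffs lines loop ((i : Int), (j : Int))).map
          (fun o => ((1 + o.1 : Int), (1 + o.2 : Int)))), 0 ≤ p.1 ∧ 0 ≤ p.2 := by
      intro p hp
      rw [List.mem_cons] at hp
      rcases hp with rfl | hp
      · exact ⟨by norm_num, by norm_num⟩
      · rw [List.mem_map] at hp
        obtain ⟨o, ho, rfl⟩ := hp
        have hb := pvOffs_bound lines loop hpre _ hmem o ho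
        exact ⟨by dsimp; omega, by dsimp; omega⟩
    have hx : r < ([["0","0","0"],["0","0","0"],["0","0","0"]] : List (List String)).length := by
      simpa using hr
    have hy : c < (([["0","0","0"],["0","0","0"],["0","0","0"]] : List (List String)).getD r []).length := by
      interval_cases r <;> simpa using hc
    rw [pv_foldl_pvWr_getD _ _ r c hnn hx hy]
    have hbase :
        ((([["0","0","0"],["0","0","0"],["0","0","0"]] : List (List String)).getD r []).getD c "")
          = "0" := by
      interval_cases r <;> interval_cases c <;> rfl
    rw [hbase]
    refine if_congr ?_ rfl rfl
    rw [pvW_block_iff lines loop hpre i j r c hr hc]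
    have htgt :
        ((((3 * i + r : Nat)) : Int), (((3 * j + c : Nat)) : Int)) ∈
            pvTargets lines loop ((i : Int), (j : Int)) ↔
          (((r : Nat) : Int), ((c : Nat) : Int)) ∈
            (((1 : Int), (1 : Int)) ::
              (pvOffs lines loop ((i : Int), (j : Int))).map
                (fun o => ((1 + o.1 : Int), (1 + o.2 : Int)))) := by
      rw [pvTargets]
      simp only [List.mem_cons, List.mem_map, Prod.mk.injEq]
      constructor
      · rintro (⟨h1, h2⟩ | ⟨o, ho, h1, h2⟩)
        · left
          constructor <;> (dsimp at h1 h2; omega)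
        · right
          exact ⟨o, ho, by dsimp at h1 ⊢; omega,
            by dsimp at h2 ⊢; omega⟩
      · rintro (⟨h1, h2⟩ | ⟨o, ho, h1, h2⟩)
        · left
          constructor <;> (dsimp; omega)
        · right
          exact ⟨o, ho, by dsimp at h1 ⊢; omega,
            by dsimp at h2 ⊢; omega⟩
    constructor
    · intro hL
      exact ⟨hmem, htgt.mpr hL⟩
    · intro h
      exact htgt.mp h.2
  · rw [if_neg hmem]
    have hnotW : ¬ ((((3 * i + r : Nat)) : Int), (((3 * j + c : Nat)) : Int)) ∈ pvW lines loop := by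
      intro hW
      exact hmem ((pvW_block_iff lines loop hpre i j r c hr hc).mp hW).1
    rw [if_neg hnotW]
    interval_cases r <;> interval_cases c <;> rfl

theorem pvB_canon (lines : List String) (loop : List (Int × Int))
    (hpre : Pre_convert_to_high_res lines loop) :
    convert_to_high_res_alt lines loop = pvCanon lines loop := by
  rw [pvB_structured, pvCanon, PySem.List.foldl_append_eq_flatMap, List.nil_append,
    ← pv_flat3 lines.length
      (fun x => (List.range ((lines.headD "").length * 3)).map (fun y => pvF lines loop x y))]
  apply List.flatMap_congr
  intro i _
  rw [pv_rows3]
  have hrow : ∀ r : Nat, r < 3 →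
      (List.range (lines.headD "").length).flatMap
          (fun j => (pvTileB lines loop i j).getD r [])
        = (List.range ((lines.headD "").length * 3)).map
            (fun y => pvF lines loop (3 * i + r) y) := by
    intro r hr
    rw [← pv_flat3 (lines.headD "").length (fun y => pvF lines loop (3 * i + r) y)]
    apply List.flatMap_congr
    intro j _
    rw [pv_list_len3 _ (pvTileB_row_length lines loop i j r hr)]
    rw [pvTileB_entry lines loop hpre i j r 0 hr (by norm_num),
        pvTileB_entry lines loop hpre i j r 1 hr (by norm_num),
        pvTileB_entry lines loop hpre i j r 2 hr (by norm_num)]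
    norm_num
  rw [List.nil_append, List.nil_append, List.nil_append,
    hrow 0 (by norm_num), hrow 1 (by norm_num), hrow 2 (by norm_num)]
  norm_num

-- ===== VERDICT (by name: the statement is the Claim_ definition above) =====
theorem convert_to_high_res_spec : Claim_equal_convert_to_high_res := by
  intro lines loop _hdom hpre
  unfold Spec_convert_to_high_res
  rw [pvA_canon lines loop hpre, pvB_canon lines loop hpre]
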